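-- pv_equiv track=rewrite | github.com/nekto-svet/DI-bootcamp | Week2/Day4/Daily-Challenge-Matrix.py | make_martix
-- ===== SOURCE A (Python) =====
-- def make_martix(string):
--     matrix = []
--     list_string = list(string)
--
--     for i in range(int(len(string)/3)):
--         matrix.append([])
--         for k in range(3):
--             matrix[i].append(list_string.pop(0))
--     return matrix
-- ===== SOURCE B (Python) =====
-- def make_martix(string):
--     it = iter(string)
--     return [list(t) for t in zip(it, it, it)]
-- ===== Notes on version B (the rewrite author's own statement) =====
-- stated objective: idiomatic
-- what changed: Replaced the nested index/pop(0) loops (quadratic: each pop(0) shifts the whole remaining list) with the grouper idiom: one shared iterator consumed three at a time by zip, which drops the remainder exactly like A's len//3 bound.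
import Mathlib
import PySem

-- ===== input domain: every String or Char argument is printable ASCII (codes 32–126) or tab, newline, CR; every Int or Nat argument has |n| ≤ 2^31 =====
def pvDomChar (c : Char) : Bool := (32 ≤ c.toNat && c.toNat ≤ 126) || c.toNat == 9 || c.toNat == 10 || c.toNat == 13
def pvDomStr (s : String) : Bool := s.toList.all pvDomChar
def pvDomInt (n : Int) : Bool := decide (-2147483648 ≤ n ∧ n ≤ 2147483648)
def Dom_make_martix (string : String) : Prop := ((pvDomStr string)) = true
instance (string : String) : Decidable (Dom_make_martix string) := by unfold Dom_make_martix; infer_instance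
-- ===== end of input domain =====

-- B replaces A's nested index/pop(0) loops with the grouper idiom (one shared
-- iterator consumed three at a time), for a more idiomatic remainder-dropping chunker.


-- ===== PORT A =====
-- list(string) yields one-character strings
def pvToStr (c : Char) : String := String.ofList [c]

-- 'matrix[i].append(list_string.pop(0))'; the 'none' branch (Python IndexError)
-- is never reached since i ranges over len//3; i ≥ 0 so .toNat is exact here
def pvInner (i : Int) (st : List (List String) × List String) :
    List (List String) × List String :=
  match PySem.List.pop? st.2 0 with
  | some (x, rest) => (st.1.modify i.toNat (fun row => row ++ [x]), rest)
  | none => st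

-- 'matrix.append([]);  for k in range(3): …'
def pvOuter (st : List (List String) × List String) (i : Int) :
    List (List String) × List String :=
  (PySem.List.pyRange 0 3 1).foldl (fun s _k => pvInner i s) (st.1 ++ [[]], st.2)

-- int(len(string)/3) = len // 3 since len ≥ 0
def make_martix (string : String) : List (List String) :=
  let list_string := string.toList.map pvToStr
  ((PySem.List.pyRange 0 ((string.toList.length / 3 : Nat) : Int) 1).foldl
      pvOuter ([], list_string)).1

-- ===== PORT B =====
-- zip(it, it, it): consume the shared iterator three at a time; zip stops when
-- fewer than three remain (remainder dropped); each tuple becomes a list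
def pvChunk3 : List Char → List (List String)
  | a :: b :: c :: rest => [pvToStr a, pvToStr b, pvToStr c] :: pvChunk3 rest
  | _ => []

def make_martix_alt (string : String) : List (List String) :=
  pvChunk3 string.toList

-- ===== PRECONDITION & SPEC =====
def Spec_make_martix (string : String) (out : List (List String)) : Prop := out = make_martix_alt string
instance (string : String) (out : List (List String)) : Decidable (Spec_make_martix string out) := by unfold Spec_make_martix; infer_instance

-- ===== CLAIM (what is proved, stated in full; the proofs are below) =====
def Claim_equal_make_martix : Prop := ∀ (string : String), Dom_make_martix string → Spec_make_martix string (make_martix string)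

-- ===== LEMMAS AND PROOFS =====

theorem pv_modify_append_length {α : Type} (m : List α) (r : α) (f : α → α) :
    (m ++ [r]).modify m.length f = m ++ [f r] := by
  induction m with
  | nil => rfl
  | cons x xs ih =>
    show x :: (xs ++ [r]).modify xs.length f = x :: (xs ++ [f r])
    rw [ih]

theorem pv_inner_step (m : List (List String)) (r : List String) (x : String)
    (rest : List String) :
    pvInner (m.length : Int) (m ++ [r], x :: rest) = (m ++ [r ++ [x]], rest) := by
  simp [pvInner, PySem.List.pop?_zero_cons, pv_modify_append_length]

theorem pv_outer_step (m : List (List String)) (a b c : String)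
    (rest : List String) :
    pvOuter (m, a :: b :: c :: rest) (m.length : Int) = (m ++ [[a, b, c]], rest) := by
  have hr : PySem.List.pyRange 0 3 1 = [0, 1, 2] := by decide
  simp only [pvOuter, hr, List.foldl_cons, List.foldl_nil]
  rw [show ((m, a :: b :: c :: rest) : List (List String) × List String).1 ++ [[]]
        = m ++ [([] : List String)] by rfl]
  rw [pv_inner_step m [] a]
  simp only [List.nil_append]
  rw [pv_inner_step m [a] b]
  simp only [List.singleton_append]
  rw [pv_inner_step m [a, b] c]
  rfl

theorem pv_key (k : Nat) : ∀ (cs : List Char) (m : List (List String)),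
    3 * k ≤ cs.length →
    (PySem.List.pyRange (m.length : Int) ((m.length : Int) + k) 1).foldl
        pvOuter (m, cs.map pvToStr)
      = (m ++ pvChunk3 (cs.take (3 * k)), (cs.drop (3 * k)).map pvToStr) := by
  induction k with
  | zero =>
    intro cs m _
    simp [PySem.List.pyRange_one_eq_nil, pvChunk3]
  | succ k ih =>
    intro cs m h
    match cs with
    | [] => simp at h
    | [a] => simp at h; omega
    | [a, b] => simp at h; omega
    | a :: b :: c :: rest =>
      have hlt : (m.length : Int) < (m.length : Int) + (k + 1 : Nat) := by
        omega
      rw [PySem.List.pyRange_one_cons hlt]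
      simp only [List.foldl_cons, List.map_cons]
      rw [pv_outer_step m (pvToStr a) (pvToStr b) (pvToStr c) (rest.map pvToStr)]
      have hlen : ((m ++ [[pvToStr a, pvToStr b, pvToStr c]]).length : Int)
          = (m.length : Int) + 1 := by simp
      have hre : (m.length : Int) + 1 = ((m ++ [[pvToStr a, pvToStr b, pvToStr c]]).length : Int) := hlen.symm
      have hrb : (m.length : Int) + ((k + 1 : Nat) : Int)
          = ((m ++ [[pvToStr a, pvToStr b, pvToStr c]]).length : Int) + (k : Nat) := by
        simp; omega
      rw [hre, hrb, ih rest (m ++ [[pvToStr a, pvToStr b, pvToStr c]]) (by simp at h ⊢; omega)]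
      have h3 : 3 * (k + 1) = 3 * k + 3 := by ring
      simp [h3, pvChunk3, List.take_succ_cons, List.drop_succ_cons]

theorem pv_chunk3_take : ∀ (cs : List Char),
    pvChunk3 (cs.take (3 * (cs.length / 3))) = pvChunk3 cs := by
  intro cs
  induction cs using pvChunk3.induct with
  | case1 a b c rest ih =>
    have h : 3 * ((a :: b :: c :: rest).length / 3) = 3 * (rest.length / 3) + 3 := by
      simp; omega
    simp only [h, List.take_succ_cons, show ∀ n, n + 3 = (n + 2) + 1 by omega,
      show ∀ n, n + 2 = (n + 1) + 1 by omega]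
    simp [pvChunk3, ih]
  | case2 cs h =>
    match cs, h with
    | [], _ => rfl
    | [a], _ => simp [pvChunk3]
    | [a, b], _ => simp [pvChunk3]
    | a :: b :: c :: rest, h => exact absurd rfl (h a b c rest)

-- ===== VERDICT (by name: the statement is the Claim_ definition above) =====
theorem make_martix_spec : Claim_equal_make_martix := by
  intro s _
  unfold Spec_make_martix make_martix make_martix_alt
  show ((PySem.List.pyRange 0 ((s.toList.length / 3 : Nat) : Int) 1).foldl
      pvOuter ([], s.toList.map pvToStr)).1 = pvChunk3 s.toList
  have h := pv_key (s.toList.length / 3) s.toList [] (by omega)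
  simp only [List.length_nil, Nat.cast_zero, Int.zero_add, List.nil_append] at h
  rw [h]
  exact pv_chunk3_take s.toList
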